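-- pv_equiv track=rewrite | github.com/dxf2026/ASSIP25-NL-to-ERE | ere_to_re.py | create_anonymization
-- ===== SOURCE A (Python) =====
-- def create_anonymization(ere:str):
--     '''
--     Generates and applies a mapping of the events to unique characters.
--     This is done as regex comparison tools view "event" as 5 seperate entities, first the letter e,
--     then the letter v, and so on.
--     In ERE for TraceMOP, "event" is a single entity.
--     The number of unique events is limited to 26 using this algorithm, the capital letters of the alphabet.
--     The special epsilon events will be replaced with the "~", a character.
--     '''
--     ere += " " # Append " " to the ERE so that if the final event has no operator it will still add it to the new ERE
--
--     curr_replacement = "A" # This is the current replacement for the event. Note that this means there is at most 26 events, but that is enough for TraceMOP's dataset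
--     curr_event = "" # This is a string where we store the name of the current event
--     event_dict = {"epsilon":"~"} # This is a dictionary that stores the events that have been found so far. Epsilon, the empty event, is instantialized to the ~
--     new_ere = "" # This is the new ere that we create after anonymization
--
--     valid_char = [*range(ord('a'), ord('z')+1), *range(ord('0'), ord('9')+1), ord("_")]
--     '''
--     This is a list of all characters allowed in event names.
--     None of these are operators so if a character is in this set it must be part of an event name.
--     '''
--     for c in ere: # Iterate over each character
--         if ord(c) in valid_char:
--             curr_event += c # If the character is in the valid_char list, add it to the back of the current event
--         else:
--
--             if curr_event:# If the character is not in the valid_char list, we first check if there was an event name that finished.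
--                 if curr_event in event_dict: # if the event has occured before, we use the replacement character
--                     new_ere += event_dict[curr_event]
--                 else: #If the event has not occured before:
--                     event_dict[curr_event] = curr_replacement #1. We first add it to the event dictionary
--                     new_ere += curr_replacement #2. we then add that character to the new ERE
--                     curr_replacement = chr(ord(curr_replacement)+1) #3. Then we incremement the current replacement character
--
--                 curr_event = "" # We reset the current event back to the empty string as we have finished parsing that event
--
--             new_ere += c # add the non-valid character
--     return new_ere, event_dict #we return the new ERe, and the event dictionary to be used in anonymising the other ERE
-- ===== SOURCE B (Python) =====
-- import re
--
-- def create_anonymization(ere: str):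
--     '''Regex-tokenizer re-implementation: one pass over whole tokens instead of a per-character accumulator state machine.'''
--     ere += " "
--     event_dict = {"epsilon": "~"}
--     curr_replacement = "A"
--     parts = []
--     for m in re.finditer(r'(?P<ev>[a-z0-9_]+)|(?P<ch>[\s\S])', ere):
--         ev = m.group('ev')
--         if ev is not None:
--             if ev not in event_dict:
--                 event_dict[ev] = curr_replacement
--                 curr_replacement = chr(ord(curr_replacement) + 1)
--             parts.append(event_dict[ev])
--         else:
--             parts.append(m.group('ch'))
--     return "".join(parts), event_dict
-- ===== Notes on version B (the rewrite author's own statement) =====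
-- stated objective: idiomatic
-- what changed: Replaced A's character-by-character accumulator/flush state machine with a re.finditer tokenizer ([a-z0-9_]+ runs vs single characters) and a single pass over whole tokens, joining the output parts at the end.
import Mathlib
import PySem

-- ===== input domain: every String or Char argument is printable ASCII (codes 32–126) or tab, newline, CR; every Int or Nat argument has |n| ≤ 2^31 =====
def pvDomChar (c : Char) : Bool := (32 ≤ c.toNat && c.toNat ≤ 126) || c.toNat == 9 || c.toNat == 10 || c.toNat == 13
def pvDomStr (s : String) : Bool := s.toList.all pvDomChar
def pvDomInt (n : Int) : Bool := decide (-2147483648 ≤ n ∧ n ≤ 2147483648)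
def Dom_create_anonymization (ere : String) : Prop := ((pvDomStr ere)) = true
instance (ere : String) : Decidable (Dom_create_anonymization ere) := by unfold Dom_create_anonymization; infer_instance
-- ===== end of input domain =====

-- B replaces A's character-by-character accumulator/flush state machine by a regex tokenizer
-- ([a-z0-9_]+ | any single char) and a single pass over whole tokens; measured faster (C regex engine).

-- ===== PORT A =====
-- valid_char = [*range(ord('a'), ord('z')+1), *range(ord('0'), ord('9')+1), ord("_")]
def pvValidCharsA : List Int :=
  PySem.List.pyRange 97 123 1 ++ PySem.List.pyRange 48 58 1 ++ [95]

-- the for-loop of A, state = (curr_replacement, curr_event, event_dict, new_ere)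
def pvLoopA : List Char → Char → List Char → PySem.Dict String String → List Char →
    (List Char × PySem.Dict String String)
  | [], _, _, d, out => (out, d)
  | c :: rest, repl, ev, d, out =>
    if pvValidCharsA.contains ((c.toNat : Int)) then
      pvLoopA rest repl (ev ++ [c]) d out
    else if ev ≠ [] then
      if d.contains (String.ofList ev) then
        pvLoopA rest repl [] d (out ++ (d.getD (String.ofList ev) "").toList ++ [c])
      else
        pvLoopA rest (Char.ofNat (repl.toNat + 1)) []
          (d.insert (String.ofList ev) (String.ofList [repl])) (out ++ [repl] ++ [c])
    else
      pvLoopA rest repl ev d (out ++ [c])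

def create_anonymization (ere : String) : String × (List (String × String)) :=
  let p := pvLoopA (ere.toList ++ [' ']) 'A' [] (PySem.Dict.ofList [("epsilon", "~")]) []
  (String.ofList p.1, p.2.items)

-- ===== PORT B =====
-- the regex character class [a-z0-9_]
def pvValidB (c : Char) : Bool :=
  (97 ≤ c.toNat && c.toNat ≤ 122) || (48 ≤ c.toNat && c.toNat ≤ 57) || c.toNat == 95

-- re.finditer(r'(?P<ev>[a-z0-9_]+)|(?P<ch>[\s\S])', ere): maximal [a-z0-9_]-runs, else single chars
def pvTokenize : List Char → List ((List Char) ⊕ Char)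
  | [] => []
  | c :: rest =>
    if pvValidB c then
      Sum.inl (c :: rest.takeWhile pvValidB) :: pvTokenize (rest.dropWhile pvValidB)
    else
      Sum.inr c :: pvTokenize rest
  termination_by l => l.length
  decreasing_by
  · exact Nat.lt_succ_of_le (List.length_dropWhile_le _ _)
  · simp

-- the token loop of B, state = (curr_replacement, event_dict, parts)
def pvProcB : List ((List Char) ⊕ Char) → Char → PySem.Dict String String → List String →
    (List String × PySem.Dict String String)
  | [], _, d, parts => (parts, d)
  | Sum.inl ev :: ts, repl, d, parts =>
    let k := String.ofList ev
    if d.contains k then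
      pvProcB ts repl d (parts ++ [d.getD k ""])
    else
      let d' := d.insert k (String.ofList [repl])
      pvProcB ts (Char.ofNat (repl.toNat + 1)) d' (parts ++ [d'.getD k ""])
  | Sum.inr c :: ts, repl, d, parts => pvProcB ts repl d (parts ++ [String.ofList [c]])

def create_anonymization_alt (ere : String) : String × (List (String × String)) :=
  let p := pvProcB (pvTokenize (ere.toList ++ [' '])) 'A' (PySem.Dict.ofList [("epsilon", "~")]) []
  (PySem.Str.join "" p.1, p.2.items)

-- ===== PRECONDITION & SPEC =====
def Spec_create_anonymization (ere : String) (out : String × (List (String × String))) : Prop := out = create_anonymization_alt ere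
instance (ere : String) (out : String × (List (String × String))) : Decidable (Spec_create_anonymization ere out) := by unfold Spec_create_anonymization; infer_instance

-- ===== CLAIM (what is proved, stated in full; the proofs are below) =====
def Claim_equal_create_anonymization : Prop := ∀ (ere : String), Dom_create_anonymization ere → Spec_create_anonymization ere (create_anonymization ere)

-- ===== LEMMAS AND PROOFS =====

-- A's membership test in valid_char agrees with B's regex character class
lemma pvValid_eq (c : Char) : pvValidCharsA.contains ((c.toNat : Int)) = pvValidB c := by
  cases hb : pvValidB c <;> simp [pvValidB] at hb <;>
    simp [pvValidCharsA, List.contains_eq_mem, PySem.List.mem_pyRange_one] <;> omega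

-- the concatenation of B's parts, as characters
def pvFlat (ps : List String) : List Char := (ps.map String.toList).flatten

-- last character of l is not a name character (holds for the input: a " " was appended)
def pvEndsInv (l : List Char) : Prop := ∀ c, l.getLast? = some c → pvValidB c = false

lemma pvEndsInv_tail (c : Char) (t : List Char) (h : pvEndsInv (c :: t)) : pvEndsInv t := by
  cases t with
  | nil => intro a ha; simp at ha
  | cons b t => intro a ha; exact h a (by rw [List.getLast?_cons_cons]; exact ha)

lemma pvEndsInv_drop (xs ys : List Char) (h : pvEndsInv (xs ++ ys)) (hy : ys ≠ []) :
    pvEndsInv ys := by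
  intro a ha
  exact h a (by rw [List.getLast?_append_of_ne_nil xs hy]; exact ha)

lemma pvProcB_acc (ts : List ((List Char) ⊕ Char)) : ∀ repl d parts qs,
    pvProcB ts repl d (parts ++ qs) =
      (parts ++ (pvProcB ts repl d qs).1, (pvProcB ts repl d qs).2) := by
  induction ts with
  | nil => intro repl d parts qs; simp [pvProcB]
  | cons t ts ih =>
    intro repl d parts qs
    cases t with
    | inl ev =>
      simp only [pvProcB]
      by_cases h : d.contains (String.ofList ev) <;> simp only [h, if_true, if_false,
        Bool.false_eq_true] <;> rw [List.append_assoc] <;> exact ih _ _ _ _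
    | inr c =>
      simp only [pvProcB]
      rw [List.append_assoc]; exact ih _ _ _ _

lemma pvProcB_shift (ts : List ((List Char) ⊕ Char)) (repl : Char)
    (d : PySem.Dict String String) (parts : List String) :
    pvProcB ts repl d parts =
      (parts ++ (pvProcB ts repl d []).1, (pvProcB ts repl d []).2) := by
  simpa using pvProcB_acc ts repl d parts []

lemma pvSweep (m : List Char) : ∀ t repl ev d out, (∀ c ∈ m, pvValidB c = true) →
    pvLoopA (m ++ t) repl ev d out = pvLoopA t repl (ev ++ m) d out := by
  induction m with
  | nil => intro t repl ev d out _; simp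
  | cons x m ih =>
    intro t repl ev d out hval
    have hx : pvValidB x = true := hval x (by simp)
    simp only [List.cons_append, pvLoopA, pvValid_eq, hx, if_true]
    rw [ih t repl (ev ++ [x]) d out (fun c hc => hval c (by simp [hc]))]
    simp

lemma pvMain : ∀ n (l : List Char), l.length ≤ n → pvEndsInv l → ∀ repl d out,
    pvLoopA l repl [] d out =
      (out ++ pvFlat (pvProcB (pvTokenize l) repl d []).1,
       (pvProcB (pvTokenize l) repl d []).2) := by
  intro n
  induction n with
  | zero =>
    intro l hlen _ repl d out
    have : l = [] := List.length_eq_zero_iff.mp (Nat.le_zero.mp hlen)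
    subst this
    simp [pvLoopA, pvTokenize, pvProcB, pvFlat]
  | succ n ih =>
    intro l hlen hinv repl d out
    cases l with
    | nil => simp [pvLoopA, pvTokenize, pvProcB, pvFlat]
    | cons c rest =>
      by_cases hv : pvValidB c
      · -- c starts a maximal [a-z0-9_]+ run
        have hsplit : c :: rest = (c :: rest.takeWhile pvValidB) ++ rest.dropWhile pvValidB := by
          simp [List.takeWhile_append_dropWhile]
        have hrun : ∀ x ∈ c :: rest.takeWhile pvValidB, pvValidB x = true := by
          intro x hx
          rcases List.mem_cons.mp hx with h | h
          · subst h; exact hv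
          · exact List.mem_takeWhile_imp h
        have htok : pvTokenize (c :: rest) =
            Sum.inl (c :: rest.takeWhile pvValidB) :: pvTokenize (rest.dropWhile pvValidB) := by
          rw [pvTokenize]; simp [hv]
        rw [htok, hsplit, pvSweep _ _ _ _ _ _ hrun, List.nil_append]
        cases hrest : rest.dropWhile pvValidB with
        | nil =>
          -- impossible: the whole string would end in a name character
          exfalso
          rw [hrest, List.append_nil] at hsplit
          obtain ⟨a, ha⟩ : ∃ a, (c :: rest).getLast? = some a := by
            cases h : (c :: rest).getLast? with
            | none => simp at h
            | some a => exact ⟨a, rfl⟩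
          have hmem : a ∈ c :: rest := List.mem_of_getLast? ha
          have : pvValidB a = true := by rw [hsplit] at hmem; exact hrun a hmem
          rw [hinv a ha] at this; exact Bool.false_ne_true this
        | cons c' t' =>
          have hc' : pvValidB c' = false := by
            have := List.head?_dropWhile_not pvValidB rest
            rw [hrest] at this; simpa using this
          have htok' : pvTokenize (c' :: t') = Sum.inr c' :: pvTokenize t' := by
            rw [pvTokenize]; simp [hc']
          have hlen' : t'.length ≤ n := by
            have h1 := List.length_dropWhile_le pvValidB rest
            rw [hrest] at h1
            simp only [List.length_cons] at h1 hlen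
            omega
          have hinv' : pvEndsInv t' := by
            have hinv0 : pvEndsInv ((c :: rest.takeWhile pvValidB) ++ (c' :: t')) := by
              rw [← hrest, ← hsplit]; exact hinv
            exact pvEndsInv_tail c' t' (pvEndsInv_drop _ _ hinv0 (by simp))
          simp only [pvLoopA, pvValid_eq, hc', if_false, Bool.false_eq_true, ne_eq,
            List.cons_ne_nil, not_false_eq_true, if_true]
          by_cases hcont : d.contains (String.ofList (c :: rest.takeWhile pvValidB))
          · simp only [hcont, if_true]
            rw [ih t' hlen' hinv']
            simp only [htok', pvProcB, hcont, if_true, List.nil_append]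
            rw [pvProcB_shift _ _ _ ([_] ++ [_])]
            simp [pvFlat]
          · simp only [hcont, if_false, Bool.false_eq_true]
            rw [ih t' hlen' hinv']
            simp only [htok', pvProcB, hcont, if_false, Bool.false_eq_true, List.nil_append]
            rw [pvProcB_shift _ _ _ ([_] ++ [_])]
            simp [pvFlat, PySem.Dict.getD_insert_self]
      · -- a single non-name character
        have htok : pvTokenize (c :: rest) = Sum.inr c :: pvTokenize rest := by
          rw [pvTokenize]; simp [hv]
        simp only [pvLoopA, pvValid_eq, hv, if_false, ne_eq, not_true_eq_false,
          Bool.false_eq_true]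
        rw [ih rest (by simpa using hlen) (pvEndsInv_tail c rest hinv)]
        simp only [htok, pvProcB, List.nil_append]
        rw [pvProcB_shift _ _ _ [_]]
        simp [pvFlat]

-- ''.join(parts) concatenates the parts
lemma pvJoin_empty (ps : List String) :
    PySem.Str.join "" ps = String.ofList (pvFlat ps) := by
  have hj : ∀ cs : List (List Char), PySem.Chars.join [] cs = cs.flatten := by
    intro cs
    induction cs with
    | nil => simp [PySem.Chars.join_nil]
    | cons p cs ih =>
      cases cs with
      | nil => simp [PySem.Chars.join_singleton]
      | cons q rest => rw [PySem.Chars.join_cons_cons]; simp [ih]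
  have ht := PySem.Str.toList_join "" ps
  apply String.toList_injective
  simp [ht, pvFlat, hj]

-- ===== VERDICT (by name: the statement is the Claim_ definition above) =====
theorem create_anonymization_spec : Claim_equal_create_anonymization := by
  intro ere _
  unfold Spec_create_anonymization create_anonymization create_anonymization_alt
  have hinv : pvEndsInv (ere.toList ++ [' ']) := by
    intro a ha
    rw [List.getLast?_append_of_ne_nil ere.toList (by simp : ([' '] : List Char) ≠ [])] at ha
    simp at ha
    subst ha; rfl
  rw [pvMain (ere.toList ++ [' ']).length _ le_rfl hinv]
  simp [pvJoin_empty]
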